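-- pv_equiv track=rewrite | github.com/wrzdx/a_star | run_stats.py | watchtower_zone
-- ===== SOURCE A (Python) =====
-- from typing import Dict, Iterable, List, Optional, Sequence, Tuple
--
-- SIZE = 13
--
-- def inside(x: int, y: int) -> bool:
--     return 0 <= x < SIZE and 0 <= y < SIZE
--
-- def moore(radius: int) -> List[Tuple[int, int]]:
--     return [
--         (dx, dy)
--         for dx in range(-radius, radius + 1)
--         for dy in range(-radius, radius + 1)
--         if max(abs(dx), abs(dy)) <= radius
--     ]
--
-- def translate(pos: Tuple[int, int], offsets: Iterable[Tuple[int, int]]) -> List[Tuple[int, int]]: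
--     x, y = pos
--     return [(x + dx, y + dy) for dx, dy in offsets if inside(x + dx, y + dy)]
--
-- def watchtower_zone(pos: Tuple[int, int], ring_on: bool) -> set[Tuple[int, int]]:
--     radius = 2
--     zone = set(translate(pos, moore(radius)))
--     if ring_on:
--         for delta in (-1, 0, 1):
--             candidates = (
--                 (pos[0] + radius, pos[1] + delta),
--                 (pos[0] - radius, pos[1] + delta),
--                 (pos[0] + delta, pos[1] + radius),
--                 (pos[0] + delta, pos[1] - radius),
--             )
--             for nx, ny in candidates:
--                 if inside(nx, ny):
--                     zone.add((nx, ny))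
--     return zone
-- ===== SOURCE B (Python) =====
-- SIZE = 13
--
-- def watchtower_zone(pos, ring_on):
--     # Scan the whole board, keeping cells within Chebyshev distance 2 of pos.
--     # ring_on is irrelevant: the ring cells are already inside the Chebyshev-2 disk.
--     px, py = pos
--     return {(x, y)
--             for x in range(SIZE)
--             for y in range(SIZE)
--             if max(abs(x - px), abs(y - py)) <= 2}
-- ===== Notes on version B (the rewrite author's own statement) =====
-- stated objective: alternative
-- what changed: B replaces A's local construction (translate a Moore-neighbourhood offset list to pos, clip to the board, then conditionally add the Chebyshev-radius ring, which is already contained in the disk) by a single whole-board scan keeping the cells within Chebyshev distance 2 of pos, ignoring the redundant ring_on flag.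
import Mathlib
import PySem

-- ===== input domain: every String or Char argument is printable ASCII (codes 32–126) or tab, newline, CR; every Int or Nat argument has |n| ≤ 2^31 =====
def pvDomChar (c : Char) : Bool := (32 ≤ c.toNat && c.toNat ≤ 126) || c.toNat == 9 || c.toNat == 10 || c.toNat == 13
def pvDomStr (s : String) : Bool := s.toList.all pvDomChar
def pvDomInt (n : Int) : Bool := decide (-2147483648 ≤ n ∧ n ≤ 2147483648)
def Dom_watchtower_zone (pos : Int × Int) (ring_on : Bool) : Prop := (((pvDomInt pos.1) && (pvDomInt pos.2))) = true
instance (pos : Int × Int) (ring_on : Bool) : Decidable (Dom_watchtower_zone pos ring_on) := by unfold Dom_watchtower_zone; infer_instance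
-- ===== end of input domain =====

-- B computes the same set by one whole-board scan with a Chebyshev-distance test, ignoring the
-- redundant ring_on flag (the ring cells are already inside the Chebyshev-2 disk); objective: alternative.

-- ===== PORT A =====
def pvInside (x y : Int) : Bool :=
  decide (0 ≤ x) && decide (x < 13) && decide (0 ≤ y) && decide (y < 13)

def pvMoore (radius : Int) : List (Int × Int) :=
  (PySem.List.pyRange (-radius) (radius + 1) 1).flatMap (fun dx =>
    ((PySem.List.pyRange (-radius) (radius + 1) 1).filter
        (fun dy => decide (max |dx| |dy| ≤ radius))).map (fun dy => (dx, dy)))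

def pvTranslate (pos : Int × Int) (offsets : List (Int × Int)) : List (Int × Int) :=
  (offsets.filter (fun d => pvInside (pos.1 + d.1) (pos.2 + d.2))).map
    (fun d => (pos.1 + d.1, pos.2 + d.2))

def watchtower_zone (pos : Int × Int) (ring_on : Bool) : List (Int × Int) :=
  let radius : Int := 2
  let zone : PySem.Set (Int × Int) := PySem.Set.ofList (pvTranslate pos (pvMoore radius))
  if ring_on then
    [(-1 : Int), 0, 1].foldl (fun zone delta =>
      [(pos.1 + radius, pos.2 + delta), (pos.1 - radius, pos.2 + delta),
       (pos.1 + delta, pos.2 + radius), (pos.1 + delta, pos.2 - radius)].foldl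
        (fun zone c => if pvInside c.1 c.2 then PySem.Set.add zone c else zone) zone) zone
  else
    zone

-- ===== PORT B =====
def watchtower_zone_alt (pos : Int × Int) (ring_on : Bool) : List (Int × Int) :=
  PySem.Set.ofList
    ((PySem.List.pyRange 0 13 1).flatMap (fun x =>
      ((PySem.List.pyRange 0 13 1).filter
          (fun y => decide (max |x - pos.1| |y - pos.2| ≤ 2))).map (fun y => (x, y))))

-- ===== PRECONDITION & SPEC =====
def Spec_watchtower_zone (pos : Int × Int) (ring_on : Bool) (out : List (Int × Int)) : Prop := out = watchtower_zone_alt pos ring_on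
instance (pos : Int × Int) (ring_on : Bool) (out : List (Int × Int)) : Decidable (Spec_watchtower_zone pos ring_on out) := by unfold Spec_watchtower_zone; infer_instance

-- ===== CLAIM (what is proved, stated in full; the proofs are below) =====
def Claim_equal_watchtower_zone : Prop := ∀ (pos : Int × Int) (ring_on : Bool), Dom_watchtower_zone pos ring_on → Spec_watchtower_zone pos ring_on (watchtower_zone pos ring_on)

-- ===== LEMMAS AND PROOFS =====

-- the canonical enumeration both underlying lists reduce to: the clipped rectangle in lex order
def pvCanon (px py : Int) : List (Int × Int) :=
  (PySem.List.pyRange (max 0 (px - 2)) (min 13 (px + 3)) 1).flatMap (fun x =>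
    (PySem.List.pyRange (max 0 (py - 2)) (min 13 (py + 3)) 1).map (fun y => (x, y)))

-- filtering an integer range by an interval condition clips the range
theorem pv_filter_pyRange (c d : Int) : ∀ (a b : Int),
    (PySem.List.pyRange a b 1).filter (fun t => decide (c ≤ t) && decide (t < d))
      = PySem.List.pyRange (max a c) (min b d) 1 := by
  have key : ∀ (n : Nat) (a b : Int), (b - a).toNat ≤ n →
      (PySem.List.pyRange a b 1).filter (fun t => decide (c ≤ t) && decide (t < d))
        = PySem.List.pyRange (max a c) (min b d) 1 := by
    intro n
    induction n with
    | zero =>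
        intro a b h
        rw [PySem.List.pyRange_one_eq_nil (by omega), PySem.List.pyRange_one_eq_nil (by omega)]
        rfl
    | succ n ih =>
        intro a b h
        by_cases hab : b ≤ a
        · rw [PySem.List.pyRange_one_eq_nil hab, PySem.List.pyRange_one_eq_nil (by omega)]
          rfl
        · replace hab : a < b := by omega
          rw [PySem.List.pyRange_one_cons hab, List.filter_cons, ih (a + 1) b (by omega)]
          by_cases hc : c ≤ a ∧ a < d
          · rw [if_pos (by simp [hc.1, hc.2])]
            rw [show max (a + 1) c = a + 1 by omega, show max a c = a by omega,
              ← PySem.List.pyRange_one_cons (by omega : a < min b d)]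
          · rw [if_neg (by simp only [Bool.and_eq_true, decide_eq_true_eq]; omega)]
            by_cases hca : a < c
            · rw [show max (a + 1) c = max a c by omega]
            · rw [PySem.List.pyRange_one_eq_nil (by omega),
                PySem.List.pyRange_one_eq_nil (by omega)]
  intro a b
  exact key (b - a).toNat a b le_rfl

-- flatMap with a guarded body is flatMap over the filtered list
theorem pv_flatMap_ite {α β : Type} (l : List α) (p : α → Bool) (g : α → List β) :
    (l.flatMap (fun x => if p x then g x else [])) = (l.filter p).flatMap g := by
  induction l with
  | nil => rfl
  | cons a l ih =>
      simp only [List.flatMap_cons, List.filter_cons]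
      by_cases h : p a = true <;> simp [h, ih]

-- filter past a map
theorem pv_filter_map {α β : Type} (l : List α) (f : α → β) (q : β → Bool) :
    (l.map f).filter q = (l.filter (fun x => q (f x))).map f := by
  induction l with
  | nil => rfl
  | cons a l ih =>
      simp only [List.map_cons, List.filter_cons]
      by_cases h : q (f a) = true <;> simp [h, ih]

-- shifting an integer range
theorem pv_map_add_pyRange (c a b : Int) :
    (PySem.List.pyRange a b 1).map (fun t => c + t) = PySem.List.pyRange (c + a) (c + b) 1 := by
  simp only [PySem.List.pyRange_one, List.map_map]
  rw [show c + b - (c + a) = b - a by ring]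
  exact List.map_congr_left (fun k _ => by simp [Function.comp]; ring)

-- translating a lex rectangle of offsets is the lex rectangle of translated bounds
theorem pv_shift_rect (px py a b c d : Int) :
    (PySem.List.pyRange a b 1).flatMap (fun dx =>
        (PySem.List.pyRange c d 1).map (fun dy => (px + dx, py + dy)))
      = (PySem.List.pyRange (px + a) (px + b) 1).flatMap (fun x =>
          (PySem.List.pyRange (py + c) (py + d) 1).map (fun y => (x, y))) := by
  rw [← pv_map_add_pyRange px a b, ← pv_map_add_pyRange py c d, List.flatMap_map]
  congr 1
  funext dx
  rw [List.map_map]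
  rfl

theorem pvA_list (px py : Int) :
    pvTranslate (px, py) (pvMoore 2) = pvCanon px py := by
  have hm : pvMoore 2 = (PySem.List.pyRange (-2) 3 1).flatMap (fun dx =>
      (PySem.List.pyRange (-2) 3 1).map (fun dy => (dx, dy))) := by decide
  unfold pvTranslate
  rw [hm, List.filter_flatMap, List.map_flatMap]
  have hsplit : ∀ dx : Int,
      ((((PySem.List.pyRange (-2) 3 1).map (fun dy => (dx, dy))).filter
          (fun d => pvInside (px + d.1) (py + d.2))).map (fun d => (px + d.1, py + d.2)))
        = if decide (-px ≤ dx) && decide (dx < 13 - px) then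
            (((PySem.List.pyRange (-2) 3 1).filter
                (fun dy => decide (-py ≤ dy) && decide (dy < 13 - py))).map
              (fun dy => (px + dx, py + dy)))
          else [] := by
    intro dx
    rw [pv_filter_map, List.map_map]
    by_cases hx : -px ≤ dx ∧ dx < 13 - px
    · rw [if_pos (by simp only [Bool.and_eq_true, decide_eq_true_eq]; exact ⟨hx.1, hx.2⟩)]
      have hpred : ∀ y ∈ PySem.List.pyRange (-2) 3 1,
          pvInside (px + dx) (py + y) = (decide (-py ≤ y) && decide (y < 13 - py)) := by
        intro y _
        unfold pvInside
        simp only [← Bool.decide_and]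
        rw [decide_eq_decide]
        constructor
        · intro h; omega
        · intro h; omega
      rw [List.filter_congr hpred]
      rfl
    · rw [if_neg (by simp only [Bool.and_eq_true, decide_eq_true_eq]; omega)]
      rw [List.map_eq_nil_iff, List.filter_eq_nil_iff]
      intro y _
      unfold pvInside
      simp only [Bool.and_eq_true, decide_eq_true_eq, not_and]
      omega
  simp only [hsplit]
  rw [pv_flatMap_ite, pv_filter_pyRange, pv_filter_pyRange, pv_shift_rect]
  unfold pvCanon
  rw [show px + max (-2) (-px) = max 0 (px - 2) by omega,
    show px + min 3 (13 - px) = min 13 (px + 3) by omega,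
    show py + max (-2) (-py) = max 0 (py - 2) by omega,
    show py + min 3 (13 - py) = min 13 (py + 3) by omega]

theorem pvB_list (px py : Int) :
    ((PySem.List.pyRange 0 13 1).flatMap (fun x =>
      ((PySem.List.pyRange 0 13 1).filter
          (fun y => decide (max |x - px| |y - py| ≤ 2))).map (fun y => (x, y))))
      = pvCanon px py := by
  have hsplit : ∀ x : Int,
      (((PySem.List.pyRange 0 13 1).filter
          (fun y => decide (max |x - px| |y - py| ≤ 2))).map (fun y => (x, y)))
        = if decide (px - 2 ≤ x) && decide (x < px + 3) then
            (((PySem.List.pyRange 0 13 1).filter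
                (fun y => decide (py - 2 ≤ y) && decide (y < py + 3))).map (fun y => (x, y)))
          else [] := by
    intro x
    by_cases hx : px - 2 ≤ x ∧ x < px + 3
    · rw [if_pos (by simp only [Bool.and_eq_true, decide_eq_true_eq]; exact ⟨hx.1, hx.2⟩)]
      congr 1
      apply List.filter_congr
      intro y _
      simp only [← Bool.decide_and]
      rw [decide_eq_decide]
      simp only [max_le_iff, abs_le]
      constructor
      · intro h; omega
      · intro h; omega
    · rw [if_neg (by simp only [Bool.and_eq_true, decide_eq_true_eq]; omega)]
      rw [List.map_eq_nil_iff, List.filter_eq_nil_iff]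
      intro y _
      simp only [decide_eq_true_eq, max_le_iff, abs_le]
      omega
  simp only [hsplit]
  rw [pv_flatMap_ite, pv_filter_pyRange, pv_filter_pyRange]
  unfold pvCanon
  rfl

-- a board cell within Chebyshev distance 2 of pos is in the canonical list
theorem pv_mem_canon (px py x y : Int) (hx0 : 0 ≤ x) (hx1 : x < 13) (hy0 : 0 ≤ y) (hy1 : y < 13)
    (hcx0 : px - 2 ≤ x) (hcx1 : x ≤ px + 2) (hcy0 : py - 2 ≤ y) (hcy1 : y ≤ py + 2) :
    (x, y) ∈ pvCanon px py := by
  unfold pvCanon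
  simp only [List.mem_flatMap, List.mem_map]
  exact ⟨x, by rw [PySem.List.mem_pyRange_one]; omega,
         y, by rw [PySem.List.mem_pyRange_one]; omega, rfl⟩

-- the guarded-add fold is a no-op when every admitted candidate is already a member
theorem pv_fold_add_noop (cs : List (Int × Int)) (z : PySem.Set (Int × Int))
    (h : ∀ c ∈ cs, pvInside c.1 c.2 = true → c ∈ z) :
    cs.foldl (fun z c => if pvInside c.1 c.2 then PySem.Set.add z c else z) z = z := by
  induction cs with
  | nil => rfl
  | cons a cs ih =>
      simp only [List.foldl_cons]
      by_cases ha : pvInside a.1 a.2 = true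
      · rw [if_pos ha, PySem.Set.add_of_mem (h a (by simp) ha)]
        exact ih (fun c hc => h c (by simp [hc]))
      · rw [if_neg ha]
        exact ih (fun c hc => h c (by simp [hc]))

-- the outer ring fold (over deltas) is a no-op under the same hypothesis
theorem pv_fold_outer (cands : Int → List (Int × Int)) (ds : List Int) (z : PySem.Set (Int × Int))
    (h : ∀ δ ∈ ds, ∀ c ∈ cands δ, pvInside c.1 c.2 = true → c ∈ z) :
    ds.foldl (fun z δ => (cands δ).foldl
        (fun z c => if pvInside c.1 c.2 then PySem.Set.add z c else z) z) z = z := by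
  induction ds with
  | nil => rfl
  | cons a ds ih =>
      simp only [List.foldl_cons]
      rw [pv_fold_add_noop _ _ (h a (by simp))]
      exact ih (fun δ hδ => h δ (by simp [hδ]))

-- ===== VERDICT (by name: the statement is the Claim_ definition above) =====
theorem watchtower_zone_spec : Claim_equal_watchtower_zone := by
  intro pos ring_on _
  obtain ⟨px, py⟩ := pos
  unfold Spec_watchtower_zone watchtower_zone watchtower_zone_alt
  dsimp only
  rw [pvA_list px py, pvB_list px py]
  have hmem : ∀ c1 c2 : Int, pvInside c1 c2 = true →
      px - 2 ≤ c1 → c1 ≤ px + 2 → py - 2 ≤ c2 → c2 ≤ py + 2 →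
      (c1, c2) ∈ PySem.Set.ofList (pvCanon px py) := by
    intro c1 c2 hin h1 h2 h3 h4
    unfold pvInside at hin
    simp only [Bool.and_eq_true, decide_eq_true_eq] at hin
    rw [PySem.Set.mem_ofList]
    exact pv_mem_canon px py c1 c2 (by omega) (by omega) (by omega) (by omega) h1 h2 h3 h4
  cases ring_on with
  | false => rfl
  | true =>
      rw [if_pos rfl]
      refine pv_fold_outer
        (fun delta => [(px + 2, py + delta), (px - 2, py + delta),
          (px + delta, py + 2), (px + delta, py - 2)])
        [(-1 : Int), 0, 1] (PySem.Set.ofList (pvCanon px py)) ?_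
      intro δ hδ c hc hin
      simp only [List.mem_cons, List.not_mem_nil, or_false] at hδ hc
      rcases hδ with rfl | rfl | rfl <;>
        (rcases hc with rfl | rfl | rfl | rfl <;>
          exact hmem _ _ hin (by omega) (by omega) (by omega) (by omega))
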